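-- pv_equiv track=rewrite | github.com/minimo162/RAGPrep | ragprep/markdown_table.py | _escape_unescaped_pipes
-- ===== SOURCE A (Python) =====
-- def _escape_unescaped_pipes(text: str) -> str:
--     out: list[str] = []
--     backslashes = 0
--     for ch in text:
--         if ch == "\\":
--             backslashes += 1
--             out.append(ch)
--             continue
--         if ch == "|":
--             if backslashes % 2 == 0:
--                 out.append("\\")
--             out.append("|")
--             backslashes = 0
--             continue
--         out.append(ch)
--         backslashes = 0
--     return "".join(out)
-- ===== SOURCE B (Python) =====
-- def _escape_unescaped_pipes(text: str) -> str:
--     parts: list[str] = []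
--     rest = text
--     while True:
--         stripped = rest.lstrip("\\")
--         run = len(rest) - len(stripped)
--         parts.append("\\" * run)
--         if not stripped:
--             break
--         ch = stripped[0]
--         parts.append("\\|" if ch == "|" and run % 2 == 0 else ch)
--         rest = stripped[1:]
--     return "".join(parts)
-- ===== Notes on version B (the rewrite author's own statement) =====
-- stated objective: alternative
-- what changed: The per-character loop carrying a backslash-counter state is replaced by a stateless chunk loop that strips each maximal backslash run at once (lstrip) and decides the single following character from that run's parity.
import Mathlib
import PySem

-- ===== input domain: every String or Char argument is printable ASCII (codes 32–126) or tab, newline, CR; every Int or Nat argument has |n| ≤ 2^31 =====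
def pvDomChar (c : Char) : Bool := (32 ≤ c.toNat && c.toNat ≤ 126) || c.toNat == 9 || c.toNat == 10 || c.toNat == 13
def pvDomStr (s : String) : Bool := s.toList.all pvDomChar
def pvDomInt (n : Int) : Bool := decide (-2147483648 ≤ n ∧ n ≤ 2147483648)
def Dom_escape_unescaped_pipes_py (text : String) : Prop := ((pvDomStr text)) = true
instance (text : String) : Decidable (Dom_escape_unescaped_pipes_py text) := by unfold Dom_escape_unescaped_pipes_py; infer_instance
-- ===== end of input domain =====

-- B replaces A's per-character backslash-counter state machine by a stateless loop over
-- maximal backslash runs; same values on every input (alternative decomposition, no speed claim).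

-- ===== PORT A =====
-- one step of A's for-loop: state = (out, backslashes)
def paStep (st : List Char × Nat) (ch : Char) : List Char × Nat :=
  if ch = '\\' then (st.1 ++ [ch], st.2 + 1)
  else if ch = '|' then
    ((if st.2 % 2 = 0 then st.1 ++ ['\\', '|'] else st.1 ++ ['|']), 0)
  else (st.1 ++ [ch], 0)

def escape_unescaped_pipes_py (text : String) : String :=
  String.ofList (text.toList.foldl paStep ([], 0)).1

-- ===== PORT B =====
-- mid piece appended for the first character after a backslash run of length `run`
def pbHandle (run : Nat) (c : Char) : List Char :=
  if c = '|' ∧ run % 2 = 0 then ['\\', '|'] else [c]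

-- B's while-loop as structural recursion; `rest.lstrip("\\")` is ported by hand as
-- dropWhile (exact: lstrip with an explicit char set drops exactly that leading run).
def pbGo (rest : List Char) : List Char :=
  match h : rest.dropWhile (· = '\\') with
  | [] => List.replicate (rest.length - ([] : List Char).length) '\\'
  | c :: t =>
      List.replicate (rest.length - (c :: t).length) '\\'
        ++ pbHandle (rest.length - (c :: t).length) c ++ pbGo t
termination_by rest.length
decreasing_by
  have hle := List.length_dropWhile_le (· = '\\') rest
  rw [h] at hle; simp at hle; omega

def escape_unescaped_pipes_py_alt (text : String) : String :=
  String.ofList (pbGo text.toList)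

-- ===== PRECONDITION & SPEC =====
def Spec_escape_unescaped_pipes_py (text : String) (out : String) : Prop := out = escape_unescaped_pipes_py_alt text
instance (text : String) (out : String) : Decidable (Spec_escape_unescaped_pipes_py text out) := by unfold Spec_escape_unescaped_pipes_py; infer_instance

-- ===== CLAIM (what is proved, stated in full; the proofs are below) =====
def Claim_equal_escape_unescaped_pipes_py : Prop := ∀ (text : String), Dom_escape_unescaped_pipes_py text → Spec_escape_unescaped_pipes_py text (escape_unescaped_pipes_py text)

-- ===== LEMMAS AND PROOFS =====

-- A's loop as structural recursion on the characters, state = backslash count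
def paGo : List Char → Nat → List Char
  | [], _ => []
  | ch :: t, b =>
    if ch = '\\' then ch :: paGo t (b + 1)
    else if ch = '|' then (if b % 2 = 0 then ['\\', '|'] else ['|']) ++ paGo t 0
    else ch :: paGo t 0

theorem paStep_foldl (l : List Char) (acc : List Char) (b : Nat) :
    (l.foldl paStep (acc, b)).1 = acc ++ paGo l b := by
  induction l generalizing acc b with
  | nil => simp [paGo]
  | cons ch t ih =>
    by_cases h1 : ch = '\\'
    · simp [paStep, paGo, h1, ih]
    · by_cases h2 : ch = '|'
      · by_cases h3 : b % 2 = 0 <;> simp [paStep, paGo, h2, h3, ih]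
      · simp [paStep, paGo, h1, h2, ih]

-- B's loop with a pending backslash count (only the parity source differs from pbGo)
def pbGo' (rest : List Char) (b : Nat) : List Char :=
  match h : rest.dropWhile (· = '\\') with
  | [] => List.replicate (rest.length - ([] : List Char).length) '\\'
  | c :: t =>
      List.replicate (rest.length - (c :: t).length) '\\'
        ++ pbHandle (b + (rest.length - (c :: t).length)) c ++ pbGo' t 0
termination_by rest.length
decreasing_by
  have hle := List.length_dropWhile_le (· = '\\') rest
  rw [h] at hle; simp at hle; omega

theorem pbGo_nil_eq {rest : List Char} (h : rest.dropWhile (· = '\\') = []) :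
    pbGo rest = List.replicate rest.length '\\' := by
  rw [pbGo]
  split
  · simp
  · next c t h' => rw [h] at h'; simp at h'

theorem pbGo_cons_eq {rest : List Char} {c : Char} {t : List Char}
    (h : rest.dropWhile (· = '\\') = c :: t) :
    pbGo rest = List.replicate (rest.length - (t.length + 1)) '\\'
      ++ pbHandle (rest.length - (t.length + 1)) c ++ pbGo t := by
  rw [pbGo]
  split
  · next h' => rw [h] at h'; simp at h'
  · next c' t' h' =>
      rw [h] at h'
      obtain ⟨rfl, rfl⟩ := List.cons.injEq .. ▸ h'
      simp

theorem pbGo'_nil_eq {rest : List Char} (b : Nat) (h : rest.dropWhile (· = '\\') = []) :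
    pbGo' rest b = List.replicate rest.length '\\' := by
  rw [pbGo']
  split
  · simp
  · next c t h' => rw [h] at h'; simp at h'

theorem pbGo'_cons_eq {rest : List Char} {c : Char} {t : List Char} (b : Nat)
    (h : rest.dropWhile (· = '\\') = c :: t) :
    pbGo' rest b = List.replicate (rest.length - (t.length + 1)) '\\'
      ++ pbHandle (b + (rest.length - (t.length + 1))) c ++ pbGo' t 0 := by
  rw [pbGo']
  split
  · next h' => rw [h] at h'; simp at h'
  · next c' t' h' =>
      rw [h] at h'
      obtain ⟨rfl, rfl⟩ := List.cons.injEq .. ▸ h'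
      simp

theorem pbGo'_zero (l : List Char) : pbGo' l 0 = pbGo l := by
  induction l using pbGo.induct with
  | case1 rest h => rw [pbGo_nil_eq h, pbGo'_nil_eq 0 h]
  | case2 rest c t h ih => rw [pbGo_cons_eq h, pbGo'_cons_eq 0 h, ih]; simp

theorem pbGo'_cons_bs (t : List Char) (b : Nat) :
    pbGo' ('\\' :: t) b = '\\' :: pbGo' t (b + 1) := by
  cases h : t.dropWhile (· = '\\') with
  | nil =>
    have h0 : ('\\' :: t).dropWhile (· = '\\') = [] := by simp [List.dropWhile, h]
    rw [pbGo'_nil_eq b h0, pbGo'_nil_eq (b + 1) h]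
    simp [List.replicate_succ]
  | cons c t' =>
    have hle := List.length_dropWhile_le (· = '\\') t
    rw [h] at hle; simp only [List.length_cons] at hle
    have h0 : ('\\' :: t).dropWhile (· = '\\') = c :: t' := by simp [List.dropWhile, h]
    rw [pbGo'_cons_eq b h0, pbGo'_cons_eq (b + 1) h]
    simp only [List.length_cons]
    have h1 : t.length + 1 - (t'.length + 1) = t.length - (t'.length + 1) + 1 := by omega
    rw [h1]
    have h2 : b + (t.length - (t'.length + 1) + 1) = b + 1 + (t.length - (t'.length + 1)) := by
      omega
    rw [h2, List.replicate_succ]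
    simp

theorem pbGo'_cons_other (c : Char) (t : List Char) (b : Nat) (hc : ¬ c = '\\') :
    pbGo' (c :: t) b = pbHandle b c ++ pbGo' t 0 := by
  have h0 : (c :: t).dropWhile (· = '\\') = c :: t := by simp [List.dropWhile, hc]
  rw [pbGo'_cons_eq b h0]
  simp

theorem paGo_eq_pbGo' (l : List Char) (b : Nat) : paGo l b = pbGo' l b := by
  induction l generalizing b with
  | nil => rw [pbGo'_nil_eq b rfl]; simp [paGo]
  | cons ch t ih =>
    by_cases h1 : ch = '\\'
    · subst h1
      rw [pbGo'_cons_bs]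
      simp [paGo, ih]
    · rw [pbGo'_cons_other ch t b h1]
      by_cases h2 : ch = '|'
      · subst h2
        by_cases h3 : b % 2 = 0 <;> simp [paGo, pbHandle, h1, h3, ih]
      · simp [paGo, pbHandle, h1, h2, ih]

-- ===== VERDICT (by name: the statement is the Claim_ definition above) =====
theorem escape_unescaped_pipes_py_spec : Claim_equal_escape_unescaped_pipes_py := by
  intro text _
  unfold Spec_escape_unescaped_pipes_py escape_unescaped_pipes_py escape_unescaped_pipes_py_alt
  rw [paStep_foldl, paGo_eq_pbGo', pbGo'_zero]
  simp
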